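-- pv_equiv track=rewrite | github.com/com0040/programmers | 프로그래머스/lv1/42840. 모의고사/모의고사.py | solution
-- ===== SOURCE A (Python) =====
-- def solution(answers):
--     # 각 수포자의 찍는 패턴을 정의합니다.
--     pattern_1 = [1, 2, 3, 4, 5]
--     pattern_2 = [2, 1, 2, 3, 2, 4, 2, 5]
--     pattern_3 = [3, 3, 1, 1, 2, 2, 4, 4, 5, 5]
--
--     # 각 수포자의 정답 수를 저장할 변수를 초기화합니다.
--     scores = [0, 0, 0]
--
--     # 정답 배열을 순회하면서 각 수포자의 정답을 비교합니다.
--     for i, answer in enumerate(answers):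
--         if answer == pattern_1[i % len(pattern_1)]:
--             scores[0] += 1
--         if answer == pattern_2[i % len(pattern_2)]:
--             scores[1] += 1
--         if answer == pattern_3[i % len(pattern_3)]:
--             scores[2] += 1
--
--     # 가장 많은 문제를 맞힌 점수를 계산합니다.
--     max_score = max(scores)
--
--     # 가장 많은 문제를 맞힌 사람들을 저장할 리스트를 초기화합니다.
--     winners = []
--
--     # 점수를 순회하면서 가장 많은 문제를 맞힌 사람들의 번호를 저장합니다.
--     for i, score in enumerate(scores):
--         if score == max_score:
--             winners.append(i + 1)
--
--     return winners
-- ===== SOURCE B (Python) =====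
-- def solution(answers):
--     patterns = [[1, 2, 3, 4, 5],
--                 [2, 1, 2, 3, 2, 4, 2, 5],
--                 [3, 3, 1, 1, 2, 2, 4, 4, 5, 5]]
--     CYCLE = 40  # lcm of the pattern lengths: position i behaves like position i % 40
--     freq = {}
--     for i, a in enumerate(answers):
--         k = (i % CYCLE, a)
--         freq[k] = freq.get(k, 0) + 1
--     # score of a pattern = how many answers sit at a residue r with value p[r % len(p)]
--     scores = [sum(freq.get((r, p[r % len(p)]), 0) for r in range(CYCLE))
--               for p in patterns]
--     best = max(scores)
--     return [i + 1 for i, s in enumerate(scores) if s == best]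
-- ===== Notes on version B (the rewrite author's own statement) =====
-- stated objective: alternative
-- what changed: A compares every answer against all three patterns inside one loop; B first builds a (position mod 40, answer) frequency dictionary in a single comparison-free pass (40 = lcm of the pattern lengths), then computes each pattern's score as 40 dictionary lookups, so the patterns are never compared against the answers element by element.
import Mathlib
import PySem

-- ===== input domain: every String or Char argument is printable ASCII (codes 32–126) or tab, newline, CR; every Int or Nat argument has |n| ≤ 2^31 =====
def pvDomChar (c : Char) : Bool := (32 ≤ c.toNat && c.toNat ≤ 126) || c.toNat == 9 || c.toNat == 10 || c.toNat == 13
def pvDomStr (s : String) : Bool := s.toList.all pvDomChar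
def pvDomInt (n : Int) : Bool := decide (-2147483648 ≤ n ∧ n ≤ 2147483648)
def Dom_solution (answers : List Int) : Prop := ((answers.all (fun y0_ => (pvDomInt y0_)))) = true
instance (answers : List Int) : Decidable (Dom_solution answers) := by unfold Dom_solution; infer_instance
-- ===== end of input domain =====

-- B replaces A's per-element pattern comparisons by a (position mod 40, answer)
-- frequency dictionary built in one pass, scored by 40 lookups per pattern
-- (alternative algorithm, same asymptotic cost).


-- ===== PORT A =====
-- pattern_k[i % len(pattern_k)]: the index is always in range, so getD's default 0 is never used (exact).
def solution (answers : List Int) : List Int :=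
  let pattern1 : List Int := [1, 2, 3, 4, 5]
  let pattern2 : List Int := [2, 1, 2, 3, 2, 4, 2, 5]
  let pattern3 : List Int := [3, 3, 1, 1, 2, 2, 4, 4, 5, 5]
  let scores : Int × Int × Int :=
    (PySem.List.enumerate answers 0).foldl
      (fun s ia =>
        (if ia.2 = pattern1.getD ((PySem.Int.mod ia.1 (pattern1.length : Int)).toNat) 0 then s.1 + 1 else s.1,
         if ia.2 = pattern2.getD ((PySem.Int.mod ia.1 (pattern2.length : Int)).toNat) 0 then s.2.1 + 1 else s.2.1,
         if ia.2 = pattern3.getD ((PySem.Int.mod ia.1 (pattern3.length : Int)).toNat) 0 then s.2.2 + 1 else s.2.2))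
      (0, 0, 0)
  let scoresL : List Int := [scores.1, scores.2.1, scores.2.2]
  -- max(scores): the list is literally nonempty, so getD's default 0 is never used (exact).
  let maxScore : Int := (PySem.List.max? scoresL (fun y => y)).getD 0
  (PySem.List.enumerate scoresL 0).foldl
    (fun w is => if is.2 = maxScore then w ++ [is.1 + 1] else w) []

-- ===== PORT B =====
-- freq: dict keyed by (i % 40, answer); freq[k] = freq.get(k, 0) + 1 is Dict.insert/getD.
def solution_alt (answers : List Int) : List Int :=
  let patterns : List (List Int) :=
    [[1, 2, 3, 4, 5], [2, 1, 2, 3, 2, 4, 2, 5], [3, 3, 1, 1, 2, 2, 4, 4, 5, 5]]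
  let freq : PySem.Dict (Int × Int) Int :=
    (PySem.List.enumerate answers 0).foldl
      (fun d ia =>
        let k : Int × Int := (PySem.Int.mod ia.1 40, ia.2)
        d.insert k (d.getD k 0 + 1))
      PySem.Dict.empty
  -- sum(freq.get((r, p[r % len(p)]), 0) for r in range(40))
  let scores : List Int := patterns.map (fun p =>
    ((PySem.List.pyRange 0 40 1).map
      (fun r => freq.getD (r, p.getD ((PySem.Int.mod r (p.length : Int)).toNat) 0) 0)).sum)
  let best : Int := (PySem.List.max? scores (fun y => y)).getD 0
  (PySem.List.enumerate scores 0).filterMap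
    (fun is => if is.2 = best then some (is.1 + 1) else none)

-- ===== PRECONDITION & SPEC =====
def Spec_solution (answers : List Int) (out : List Int) : Prop := out = solution_alt answers
instance (answers : List Int) (out : List Int) : Decidable (Spec_solution answers out) := by unfold Spec_solution; infer_instance

-- ===== CLAIM (what is proved, stated in full; the proofs are below) =====
def Claim_equal_solution : Prop := ∀ (answers : List Int), Dom_solution answers → Spec_solution answers (solution answers)

-- ===== LEMMAS AND PROOFS =====

-- A loop with three independent counters is three independent counting loops.
theorem pv_fold_triple (l : List (Int × Int)) (p q r : Int × Int → Prop)
    [DecidablePred p] [DecidablePred q] [DecidablePred r] (a b c : Int) :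
    l.foldl (fun s ia =>
        ((if p ia then s.1 + 1 else s.1 : Int),
         (if q ia then s.2.1 + 1 else s.2.1 : Int),
         (if r ia then s.2.2 + 1 else s.2.2 : Int))) (a, b, c)
      = (a + (l.countP (fun ia => decide (p ia)) : Int),
         b + (l.countP (fun ia => decide (q ia)) : Int),
         c + (l.countP (fun ia => decide (r ia)) : Int)) := by
  induction l generalizing a b c with
  | nil => simp
  | cons x t ih =>
    simp only [List.foldl_cons, ih, List.countP_cons]
    split_ifs <;> simp_all [Prod.ext_iff, add_assoc, add_comm]

-- The winner loop ('if score == max: winners.append(i+1)') and the winner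
-- comprehension (filterMap) produce the same list.
theorem pv_loop_eq (l : List (Int × Int)) (m : Int) :
    l.foldl (fun w is => if is.2 = m then w ++ [is.1 + 1] else w) ([] : List Int)
      = l.filterMap (fun is => if is.2 = m then some (is.1 + 1) else none) := by
  rw [PySem.List.foldl_append_ite (p := fun is : Int × Int => is.2 = m) (f := fun is => is.1 + 1)]
  induction l with
  | nil => simp
  | cons x t ih => simp only [List.filterMap_cons, List.filter_cons]; split_ifs <;> simp_all

-- Folding i % 40 into the pattern lookup: g (i % 40) = g i when the cycle length divides 40.
theorem pv_mod_mod (i : Int) (L : Int) (hL : 0 < L) (hdvd : L ∣ 40) :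
    PySem.Int.mod (PySem.Int.mod i 40) L = PySem.Int.mod i L := by
  rw [PySem.Int.mod_eq_emod_of_pos (by omega : (0:Int) < 40),
      PySem.Int.mod_eq_emod_of_pos hL, PySem.Int.mod_eq_emod_of_pos hL]
  exact Int.emod_emod_of_dvd i hdvd

-- Summing the (r, g r)-counts of the residue-tagged list over r = 0..39 recovers the
-- direct match count, provided g only depends on the residue mod 40.
theorem pv_sum_count (l : List (Int × Int)) (g : Int → Int)
    (hg : ∀ i : Int, g (PySem.Int.mod i 40) = g i) :
    ((PySem.List.pyRange 0 40 1).map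
        (fun r => ((l.map (fun ia => (PySem.Int.mod ia.1 40, ia.2))).count (r, g r) : Int))).sum
      = (l.countP (fun ia => decide (ia.2 = g ia.1)) : Int) := by
  induction l with
  | nil => simp
  | cons x t ih =>
    have hm0 : (0:Int) ≤ PySem.Int.mod x.1 40 := PySem.Int.mod_nonneg x.1 (by omega)
    have hm1 : PySem.Int.mod x.1 40 < 40 := PySem.Int.mod_lt x.1 (by omega)
    simp only [List.map_cons, List.count_cons, List.countP_cons]
    push_cast
    have hsplit : ∀ r : Int,
        (((t.map (fun ia => (PySem.Int.mod ia.1 40, ia.2))).count (r, g r) : Int)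
          + (if ((PySem.Int.mod x.1 40, x.2) == (r, g r)) = true then (1:Int) else 0))
        = ((t.map (fun ia => (PySem.Int.mod ia.1 40, ia.2))).count (r, g r) : Int)
          + (if x.2 = g (PySem.Int.mod x.1 40)
              then (if (r == PySem.Int.mod x.1 40) = true then (1:Int) else 0) else 0) := by
      intro r
      congr 1
      simp only [beq_iff_eq]
      by_cases h2 : r = PySem.Int.mod x.1 40
      · subst h2
        by_cases h1 : x.2 = g (PySem.Int.mod x.1 40) <;> simp [Prod.ext_iff, h1]
      · have hne : ((PySem.Int.mod x.1 40, x.2) : Int × Int) ≠ (r, g r) :=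
          fun h => h2 (congrArg Prod.fst h).symm
        rw [if_neg hne, if_neg h2, ite_self]
    simp only [hsplit]
    rw [PySem.List.sum_map_add_int, ih]
    by_cases h1 : x.2 = g (PySem.Int.mod x.1 40)
    · have h1x : x.2 = g x.1 := hg x.1 ▸ h1
      simp only [if_pos h1]
      rw [PySem.List.sum_map_ite_one_zero, ← List.count_eq_countP]
      have hmem : PySem.Int.mod x.1 40 ∈ PySem.List.pyRange 0 40 1 := by
        rw [PySem.List.mem_pyRange_one]; omega
      have hnodup : (PySem.List.pyRange 0 40 1).Nodup := by decide
      rw [List.count_eq_one_of_mem hnodup hmem]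
      simp [h1x]
    · have h1' : ¬ x.2 = g x.1 := fun h => h1 (by rw [hg x.1]; exact h)
      have h1p : ¬ x.2 = g (x.1 % 40) := by
        rwa [PySem.Int.mod_eq_emod_of_pos (by omega : (0:Int) < 40)] at h1
      simp [h1p, h1']

-- The frequency-dictionary lookup is a count over the residue-tagged list.
theorem pv_freq_getD (l : List (Int × Int)) (k : Int × Int) :
    (l.foldl (fun d ia =>
        d.insert (PySem.Int.mod ia.1 40, ia.2)
          (d.getD (PySem.Int.mod ia.1 40, ia.2) 0 + 1))
      (PySem.Dict.empty : PySem.Dict (Int × Int) Int)).getD k 0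
      = ((l.map (fun ia => (PySem.Int.mod ia.1 40, ia.2))).count k : Int) := by
  have h : l.foldl (fun d ia =>
        d.insert (PySem.Int.mod ia.1 40, ia.2)
          (d.getD (PySem.Int.mod ia.1 40, ia.2) 0 + 1))
      (PySem.Dict.empty : PySem.Dict (Int × Int) Int)
      = (l.map (fun ia => (PySem.Int.mod ia.1 40, ia.2))).foldl
          (fun d x => d.insert x (d.getD x 0 + 1)) PySem.Dict.empty := by
    rw [List.foldl_map]
  rw [h, PySem.Dict.getD_foldl_insert_add_one]
  simp [PySem.Dict.empty, PySem.Dict.getD, PySem.Dict.get?]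

-- ===== VERDICT (by name: the statement is the Claim_ definition above) =====
theorem solution_spec : Claim_equal_solution := by
  intro answers _
  show solution answers = solution_alt answers
  unfold solution solution_alt
  simp only [pv_fold_triple, zero_add, List.map_cons, List.map_nil]
  simp only [pv_freq_getD]
  rw [pv_sum_count _ _ (fun i => by
        rw [show (([1,2,3,4,5] : List Int).length : Int) = 5 from rfl,
            pv_mod_mod i 5 (by omega) (by decide)]),
      pv_sum_count _ _ (fun i => by
        rw [show (([2,1,2,3,2,4,2,5] : List Int).length : Int) = 8 from rfl,
            pv_mod_mod i 8 (by omega) (by decide)]),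
      pv_sum_count _ _ (fun i => by
        rw [show (([3,3,1,1,2,2,4,4,5,5] : List Int).length : Int) = 10 from rfl,
            pv_mod_mod i 10 (by omega) (by decide)])]
  rw [pv_loop_eq]
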